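-- pv_equiv track=rewrite | github.com/tonishi1290/sd-radio-spectral-fits | src/tools/necst/multibeam_beam_measurement/sunscan_legacy_compat.py | _pick_field_name
-- ===== SOURCE A (Python) =====
-- def _norm_name(x) -> str:
--     try:
--         return str(x).strip()
--     except Exception:
--         return ""
--
-- def _pick_field_name(names, preferred, candidates):
--     if preferred:
--         p = _norm_name(preferred)
--         for n in names:
--             if _norm_name(n) == p:
--                 return n
--         for n in names:
--             if _norm_name(n).lower() == p.lower():
--                 return n
--
--     for c in candidates:
--         cc = _norm_name(c)
--         for n in names:
--             if _norm_name(n) == cc: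
--                 return n
--         for n in names:
--             if _norm_name(n).lower() == cc.lower():
--                 return n
--
--     low = [(_norm_name(n), _norm_name(n).lower()) for n in names]
--     for c in candidates:
--         cl = _norm_name(c).lower()
--         for (n0, nl) in low:
--             if cl and cl in nl:
--                 return n0
--     return None
-- ===== SOURCE B (Python) =====
-- def _norm_name(x) -> str:
--     try:
--         return str(x).strip()
--     except Exception:
--         return ""
--
-- def _pick_field_name(names, preferred, candidates):
--     # Transposed algorithm: build the ordered list of match tests once, then a
--     # single pass over names keeps the name with the smallest matching test rank
--     # (earlier name wins ties); the winner's value depends on the test kind.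
--     tests = []
--     if preferred:
--         p = _norm_name(preferred)
--         tests.append(('eq', p))
--         tests.append(('lo', p.lower()))
--     for c in candidates:
--         cc = _norm_name(c)
--         tests.append(('eq', cc))
--         tests.append(('lo', cc.lower()))
--     for c in candidates:
--         tests.append(('sub', _norm_name(c).lower()))
--
--     best_rank = None
--     best = None
--     for n in names:
--         n0 = _norm_name(n)
--         nl = n0.lower()
--         for i, (kind, q) in enumerate(tests):
--             if best_rank is not None and i >= best_rank:
--                 break
--             if kind == 'eq':
--                 hit = (n0 == q)
--             elif kind == 'lo':
--                 hit = (nl == q)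
--             else:
--                 hit = bool(q) and q in nl
--             if hit:
--                 best_rank = i
--                 best = n0 if kind == 'sub' else n
--                 break
--     return best
-- ===== Notes on version B (the rewrite author's own statement) =====
-- stated objective: alternative
-- what changed: B transposes A's loop nest: it builds one ordered list of match tests (preferred exact/lower, candidate exact/lower, candidate substring) and then makes a single pass over names, keeping the lexicographic argmin (test rank, name position) with an early break once a name's scan reaches the current best rank; A instead scans names repeatedly, once or twice per query.
import Mathlib
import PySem

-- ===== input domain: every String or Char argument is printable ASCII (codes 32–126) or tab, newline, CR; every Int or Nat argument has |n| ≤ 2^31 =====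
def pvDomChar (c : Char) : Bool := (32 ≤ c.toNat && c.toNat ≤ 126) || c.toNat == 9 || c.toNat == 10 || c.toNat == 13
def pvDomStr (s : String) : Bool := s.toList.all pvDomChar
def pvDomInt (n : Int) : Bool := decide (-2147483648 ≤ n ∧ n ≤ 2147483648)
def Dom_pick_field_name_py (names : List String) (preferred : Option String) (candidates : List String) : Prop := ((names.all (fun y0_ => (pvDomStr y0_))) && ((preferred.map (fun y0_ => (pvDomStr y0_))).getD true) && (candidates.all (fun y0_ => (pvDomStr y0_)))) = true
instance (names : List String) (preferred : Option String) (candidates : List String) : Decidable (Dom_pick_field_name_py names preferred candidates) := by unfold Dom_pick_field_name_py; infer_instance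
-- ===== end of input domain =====

-- B transposes A's loop nest: it builds one ordered list of match tests and makes a
-- single pass over names keeping the lexicographic argmin (test rank, name position).

-- ===== PORT A =====
def normName (x : String) : String := PySem.Str.strip x

-- A: 'for c in candidates' with the two inner scans over names
def pickA_cand (names : List String) : List String → Option String
  | [] => none
  | c :: cs =>
    let cc := normName c
    match names.find? (fun n => normName n == cc) with
    | some n => some n
    | none =>
      match names.find? (fun n => PySem.Str.lower (normName n) == PySem.Str.lower cc) with
      | some n => some n
      | none => pickA_cand names cs

-- A: substring fallback over the precomputed 'low' list
def pickA_sub (low : List (String × String)) : List String → Option String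
  | [] => none
  | c :: cs =>
    let cl := PySem.Str.lower (normName c)
    match low.find? (fun p => !(cl == "") && PySem.Str.isIn cl p.2) with
    | some p => some p.1
    | none => pickA_sub low cs

def pick_field_name_py (names : List String) (preferred : Option String) (candidates : List String) : Option String :=
  let prefHit : Option String :=
    match preferred with
    | some p0 =>
      if p0 == "" then none
      else
        let p := normName p0
        match names.find? (fun n => normName n == p) with
        | some n => some n
        | none => names.find? (fun n => PySem.Str.lower (normName n) == PySem.Str.lower p)
    | none => none
  match prefHit with
  | some n => some n
  | none =>
    match pickA_cand names candidates with
    | some n => some n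
    | none =>
      pickA_sub (names.map (fun n => (normName n, PySem.Str.lower (normName n)))) candidates

-- ===== PORT B =====
inductive PKind | keq | klo | ksub
deriving DecidableEq, Repr

-- the ordered test list: preferred exact/lower, candidate exact/lower, candidate substring
def mkTests (preferred : Option String) (candidates : List String) : List (PKind × String) :=
  let pt : List (PKind × String) :=
    match preferred with
    | some p0 =>
      if p0 == "" then []
      else
        let p := normName p0
        [(PKind.keq, p), (PKind.klo, PySem.Str.lower p)]
    | none => []
  let ct := candidates.flatMap (fun c =>
    let cc := normName c
    [((PKind.keq, cc) : PKind × String), (PKind.klo, PySem.Str.lower cc)])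
  let st := candidates.map (fun c => ((PKind.ksub, PySem.Str.lower (normName c)) : PKind × String))
  pt ++ ct ++ st

def testHit (n0 nl : String) : PKind × String → Bool
  | (PKind.keq, q) => n0 == q
  | (PKind.klo, q) => nl == q
  | (PKind.ksub, q) => !(q == "") && PySem.Str.isIn q nl

def testVal (n n0 : String) : PKind → String
  | PKind.ksub => n0
  | _ => n

-- B's inner loop over enumerate(tests) with the two breaks
def innerScan (n n0 nl : String) (bestRank : Option Nat) :
    List (PKind × String) → Nat → Option (Nat × String)
  | [], _ => none
  | t :: ts, i =>
    if (match bestRank with | some r => decide (r ≤ i) | none => false) then none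
    else if testHit n0 nl t then some (i, testVal n n0 t.1)
    else innerScan n n0 nl bestRank ts (i + 1)

def pick_field_name_py_alt (names : List String) (preferred : Option String) (candidates : List String) : Option String :=
  let tests := mkTests preferred candidates
  let fin := names.foldl
    (fun acc n =>
      let n0 := normName n
      let nl := PySem.Str.lower n0
      match innerScan n n0 nl (acc.map Prod.fst) tests 0 with
      | some h => some h
      | none => acc)
    (none : Option (Nat × String))
  fin.map Prod.snd

-- ===== PRECONDITION & SPEC =====
def Spec_pick_field_name_py (names : List String) (preferred : Option String) (candidates : List String) (out : Option String) : Prop := out = pick_field_name_py_alt names preferred candidates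
instance (names : List String) (preferred : Option String) (candidates : List String) (out : Option String) : Decidable (Spec_pick_field_name_py names preferred candidates out) := by unfold Spec_pick_field_name_py; infer_instance

-- ===== CLAIM (what is proved, stated in full; the proofs are below) =====
def Claim_equal_pick_field_name_py : Prop := ∀ (names : List String) (preferred : Option String) (candidates : List String), Dom_pick_field_name_py names preferred candidates → Spec_pick_field_name_py names preferred candidates (pick_field_name_py names preferred candidates)

-- ===== LEMMAS AND PROOFS =====

-- common reference: tests-outer, names-inner scan
def refT (names : List String) : List (PKind × String) → Option String
  | [] => none
  | t :: ts =>
    match names.find? (fun n => testHit (normName n) (PySem.Str.lower (normName n)) t) with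
    | some n => some (testVal n (normName n) t.1)
    | none => refT names ts

-- first hit of a single name over the tests, with starting index
def firstHitAux (n n0 nl : String) : List (PKind × String) → Nat → Option (Nat × String)
  | [], _ => none
  | t :: ts, i =>
    if testHit n0 nl t then some (i, testVal n n0 t.1)
    else firstHitAux n n0 nl ts (i + 1)

theorem refT_append (names : List String) (l1 l2 : List (PKind × String)) :
    refT names (l1 ++ l2)
      = (match refT names l1 with | some v => some v | none => refT names l2) := by
  induction l1 with
  | nil => simp [refT]
  | cons t ts ih =>
    simp only [List.cons_append, refT]
    cases names.find? (fun n => testHit (normName n) (PySem.Str.lower (normName n)) t) with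
    | some n => rfl
    | none => exact ih

-- ===== A = refT =====
theorem refT_cand (names : List String) (cs : List String) :
    refT names (cs.flatMap (fun c =>
      let cc := normName c
      [((PKind.keq, cc) : PKind × String), (PKind.klo, PySem.Str.lower cc)]))
      = pickA_cand names cs := by
  induction cs with
  | nil => rfl
  | cons c t ih =>
    simp only [List.flatMap_cons, List.cons_append, List.nil_append, refT, testHit, testVal,
      pickA_cand]
    cases names.find? (fun n => normName n == normName c) with
    | some n => rfl
    | none =>
      cases names.find? (fun n =>
          PySem.Str.lower (normName n) == PySem.Str.lower (normName c)) with
      | some n => rfl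
      | none => exact ih

theorem refT_sub (names : List String) (cs : List String) :
    refT names (cs.map (fun c => ((PKind.ksub, PySem.Str.lower (normName c)) : PKind × String)))
      = pickA_sub (names.map (fun n => (normName n, PySem.Str.lower (normName n)))) cs := by
  induction cs with
  | nil => rfl
  | cons c t ih =>
    simp only [List.map_cons, refT, testHit, testVal, pickA_sub, List.find?_map,
      Function.comp_def]
    cases hfind : names.find? (fun n =>
        !(PySem.Str.lower (normName c) == "") &&
          PySem.Str.isIn (PySem.Str.lower (normName c)) (PySem.Str.lower (normName n))) with
    | some n => simp
    | none => simpa using ih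

theorem A_eq_refT (names : List String) (preferred : Option String) (candidates : List String) :
    pick_field_name_py names preferred candidates
      = refT names (mkTests preferred candidates) := by
  unfold pick_field_name_py mkTests
  rw [refT_append, refT_append, refT_cand, refT_sub]
  cases preferred with
  | none => rfl
  | some p0 =>
    by_cases hp : p0 = ""
    · subst hp; rfl
    · have hb : (p0 == "") = false := by simpa using hp
      simp only [hb, Bool.false_eq_true, if_false, refT, testHit, testVal]
      cases names.find? (fun n => normName n == normName p0) with
      | some n => rfl
      | none =>
        cases names.find? (fun n =>
            PySem.Str.lower (normName n) == PySem.Str.lower (normName p0)) with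
        | some n => rfl
        | none => rfl

-- ===== B = refT =====

theorem firstHitAux_shift (n n0 nl : String) (ts : List (PKind × String)) (i : Nat) :
    firstHitAux n n0 nl ts (i + 1)
      = (firstHitAux n n0 nl ts i).map (fun h => (h.1 + 1, h.2)) := by
  induction ts generalizing i with
  | nil => rfl
  | cons t ts ih =>
    simp only [firstHitAux]
    by_cases h : testHit n0 nl t
    · simp [h]
    · simp only [h]; exact ih (i + 1)

theorem firstHitAux_ge (n n0 nl : String) (ts : List (PKind × String)) (i : Nat)
    (j : Nat) (v : String) (h : firstHitAux n n0 nl ts i = some (j, v)) : i ≤ j := by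
  induction ts generalizing i with
  | nil => simp [firstHitAux] at h
  | cons t ts ih =>
    simp only [firstHitAux] at h
    by_cases hh : testHit n0 nl t
    · simp [hh] at h; omega
    · simp only [hh] at h
      have := ih (i + 1) h; omega

-- innerScan with threshold = firstHit filtered by the threshold
theorem innerScan_none (n n0 nl : String) (ts : List (PKind × String)) (i : Nat) :
    innerScan n n0 nl none ts i = firstHitAux n n0 nl ts i := by
  induction ts generalizing i with
  | nil => rfl
  | cons t ts ih =>
    simp only [innerScan, firstHitAux, Bool.false_eq_true, if_false]
    split
    · rfl
    · exact ih (i + 1)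

theorem innerScan_some (n n0 nl : String) (r : Nat) (ts : List (PKind × String)) (i : Nat) :
    innerScan n n0 nl (some r) ts i
      = match firstHitAux n n0 nl ts i with
        | some h => if h.1 < r then some h else none
        | none => none := by
  induction ts generalizing i with
  | nil => rfl
  | cons t ts ih =>
    simp only [innerScan, firstHitAux]
    by_cases hri : r ≤ i
    · have : (decide (r ≤ i)) = true := by simpa using hri
      simp only [this, if_true]
      by_cases hh : testHit n0 nl t
      · simp only [hh, if_true]
        have : ¬ i < r := by omega
        simp [this]
      · simp only [hh]
        cases hfa : firstHitAux n n0 nl ts (i + 1) with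
        | none => rfl
        | some h =>
          have hij : i + 1 ≤ h.1 := firstHitAux_ge n n0 nl ts (i + 1) h.1 h.2 (by
            simpa using hfa)
          have : ¬ h.1 < r := by omega
          simp [this]
    · have : (decide (r ≤ i)) = false := by simpa using hri
      simp only [this]
      by_cases hh : testHit n0 nl t
      · have : i < r := by omega
        simp [hh, this]
      · simp only [hh]; exact ih (i + 1)

-- the names-outer fold, abstracted
def stepF (tests : List (PKind × String)) (acc : Option (Nat × String)) (n : String) :
    Option (Nat × String) :=
  match innerScan n (normName n) (PySem.Str.lower (normName n)) (acc.map Prod.fst) tests 0 with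
  | some h => some h
  | none => acc

def firstHit (tests : List (PKind × String)) (n : String) : Option (Nat × String) :=
  firstHitAux n (normName n) (PySem.Str.lower (normName n)) tests 0

theorem stepF_char (tests : List (PKind × String)) (acc : Option (Nat × String)) (n : String) :
    stepF tests acc n
      = match acc, firstHit tests n with
        | none, h => h
        | some a, none => some a
        | some a, some h => if h.1 < a.1 then some h else some a := by
  unfold stepF firstHit
  cases acc with
  | none =>
    simp only [Option.map_none]
    rw [innerScan_none]
    cases firstHitAux n (normName n) (PySem.Str.lower (normName n)) tests 0 <;> rfl
  | some a =>
    simp only [Option.map_some]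
    rw [innerScan_some]
    cases firstHitAux n (normName n) (PySem.Str.lower (normName n)) tests 0 with
    | none => rfl
    | some h => by_cases hlt : h.1 < a.1 <;> simp [hlt]

-- firstHit on a cons test list
theorem firstHit_cons (t : PKind × String) (ts : List (PKind × String)) (n : String) :
    firstHit (t :: ts) n
      = if testHit (normName n) (PySem.Str.lower (normName n)) t
        then some (0, testVal n (normName n) t.1)
        else (firstHit ts n).map (fun h => (h.1 + 1, h.2)) := by
  unfold firstHit
  simp only [firstHitAux]
  split
  · rfl
  · exact firstHitAux_shift n (normName n) (PySem.Str.lower (normName n)) ts 0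

-- the fold with everything shifted by one computes the shifted fold
theorem foldl_stepF_shift (ts : List (PKind × String)) (t : PKind × String)
    (names : List String) (acc : Option (Nat × String))
    (hmiss : ∀ n ∈ names, testHit (normName n) (PySem.Str.lower (normName n)) t = false) :
    names.foldl (stepF (t :: ts)) (acc.map (fun h => (h.1 + 1, h.2)))
      = (names.foldl (stepF ts) acc).map (fun h => (h.1 + 1, h.2)) := by
  induction names generalizing acc with
  | nil => rfl
  | cons n ns ih =>
    simp only [List.foldl_cons]
    have hm := hmiss n (by simp)
    have hstep : stepF (t :: ts) (acc.map (fun h => (h.1 + 1, h.2))) n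
        = (stepF ts acc n).map (fun h => (h.1 + 1, h.2)) := by
      rw [stepF_char, stepF_char, firstHit_cons, hm]
      simp only [if_false, Bool.false_eq_true]
      cases acc with
      | none => cases firstHit ts n <;> rfl
      | some a =>
        cases firstHit ts n with
        | none => rfl
        | some h =>
          simp only [Option.map_some]
          by_cases hlt : h.1 < a.1
          · have : h.1 + 1 < a.1 + 1 := by omega
            simp [hlt, this]
          · have : ¬ h.1 + 1 < a.1 + 1 := by omega
            simp [hlt, this]
    rw [hstep, ih _ (fun m hm2 => hmiss m (by simp [hm2]))]

-- once rank 0 is held, the fold never changes the accumulator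
theorem foldl_stepF_zero (tests : List (PKind × String)) (names : List String) (v : String) :
    names.foldl (stepF tests) (some (0, v)) = some (0, v) := by
  induction names with
  | nil => rfl
  | cons n ns ih =>
    simp only [List.foldl_cons]
    have : stepF tests (some (0, v)) n = some (0, v) := by
      rw [stepF_char]
      cases firstHit tests n with
      | none => rfl
      | some h => simp
    rw [this]; exact ih

theorem B_eq_refT_aux (tests : List (PKind × String)) (names : List String) :
    (names.foldl (stepF tests) none).map Prod.snd = refT names tests := by
  induction tests generalizing names with
  | nil =>
    have h : names.foldl (stepF []) none = none := by
      induction names with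
      | nil => rfl
      | cons n ns ih =>
        simp only [List.foldl_cons]
        have : stepF [] none n = none := by rw [stepF_char]; rfl
        rw [this]; exact ih
    rw [h]; induction names <;> rfl
  | cons t ts ih =>
    simp only [refT]
    cases hfind : names.find? (fun n => testHit (normName n) (PySem.Str.lower (normName n)) t) with
    | none =>
      -- no name hits test t: every firstHit is shifted from ts
      have hmiss : ∀ n ∈ names, testHit (normName n) (PySem.Str.lower (normName n)) t = false := by
        intro n hn
        have := List.find?_eq_none.mp hfind n hn
        simpa using this
      have := foldl_stepF_shift ts t names none hmiss
      simp only [Option.map_none] at this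
      rw [this]
      rw [← ih names]
      cases names.foldl (stepF ts) none <;> rfl
    | some n =>
      -- split names at the first hit of test t
      obtain ⟨ns1, ns2, hsplit, hhit, hpre⟩ :
          ∃ ns1 ns2, names = ns1 ++ n :: ns2 ∧
            testHit (normName n) (PySem.Str.lower (normName n)) t = true ∧
            ∀ m ∈ ns1, testHit (normName m) (PySem.Str.lower (normName m)) t = false := by
        obtain ⟨h1, ns1, ns2, h2, h3⟩ := List.find?_eq_some_iff_append.mp hfind
        exact ⟨ns1, ns2, h2, h1, fun m hm => by simpa using h3 m hm⟩
      subst hsplit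
      rw [List.foldl_append, List.foldl_cons]
      have hshift := foldl_stepF_shift ts t ns1 none hpre
      simp only [Option.map_none] at hshift
      rw [hshift]
      have hstep : stepF (t :: ts) ((ns1.foldl (stepF ts) none).map (fun h => (h.1 + 1, h.2))) n
          = some (0, testVal n (normName n) t.1) := by
        rw [stepF_char, firstHit_cons, hhit]
        cases ns1.foldl (stepF ts) none with
        | none => rfl
        | some a => simp
      rw [hstep, foldl_stepF_zero]
      rfl

theorem B_eq_refT (names : List String) (preferred : Option String) (candidates : List String) :
    pick_field_name_py_alt names preferred candidates
      = refT names (mkTests preferred candidates) := by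
  unfold pick_field_name_py_alt
  exact B_eq_refT_aux (mkTests preferred candidates) names

-- ===== VERDICT (by name: the statement is the Claim_ definition above) =====
theorem pick_field_name_py_spec : Claim_equal_pick_field_name_py := by
  intro names preferred candidates _
  unfold Spec_pick_field_name_py
  rw [A_eq_refT, B_eq_refT]
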